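-- pv_equiv track=rewrite | github.com/MakarRybkin/Tinkoff-algorithms-and-data-structures | 5/d.py | min_lex_cyclic_shift
-- ===== SOURCE A (Python) =====
-- def min_lex_cyclic_shift(S):
--     S = S + S
--     n = len(S) // 2
--     f = [-1] * (2 * n)
--     k = 0
--
--     for j in range(1, 2 * n):
--         i = f[j - k - 1]
--         while i != -1 and S[j] != S[k + i + 1]:
--             if S[j] < S[k + i + 1]:
--                 k = j - i - 1
--             i = f[i]
--
--         if S[j] != S[k + i + 1]:
--             if S[j] < S[k]:
--                 k = j
--             f[j - k] = -1
--         else: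
--             f[j - k] = i + 1
--
--     return S[k:k + n]
-- ===== SOURCE B (Python) =====
-- def min_lex_cyclic_shift(S):
--     n = len(S)
--     return min((S[i:] + S[:i] for i in range(n)), default="")
-- ===== Notes on version B (the rewrite author's own statement) =====
-- stated objective: idiomatic
-- what changed: Replaces Booth's failure-function scan over the doubled string with the one-line idiomatic form: take min() over the n rotations S[i:]+S[:i].
import Mathlib
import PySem

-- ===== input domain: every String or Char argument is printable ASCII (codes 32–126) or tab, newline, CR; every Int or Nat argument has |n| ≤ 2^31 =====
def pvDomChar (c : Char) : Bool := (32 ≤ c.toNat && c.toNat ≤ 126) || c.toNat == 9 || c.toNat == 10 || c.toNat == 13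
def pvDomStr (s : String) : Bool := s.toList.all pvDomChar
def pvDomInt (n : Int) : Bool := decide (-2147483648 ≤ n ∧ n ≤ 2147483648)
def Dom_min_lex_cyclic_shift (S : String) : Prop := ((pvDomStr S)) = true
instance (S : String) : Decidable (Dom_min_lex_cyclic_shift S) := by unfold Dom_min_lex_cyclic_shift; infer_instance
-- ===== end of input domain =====

-- B replaces Booth's O(n) failure-function scan with the idiomatic one-liner min() over all n
-- rotations (same return value; not faster); the equivalence proved below amounts to functional
-- correctness of Booth's algorithm: it returns the lexicographically least rotation.

-- ===== PORT A =====
-- inner while loop of A (fuel makes the recursion total; never exhausted on real runs)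
def boothWhile (t : List Char) (j : Int) (f : List Int) : Nat → Int → Int → Int × Int
  | 0, k, i => (k, i)
  | fuel+1, k, i =>
    if i ≠ -1 ∧ PySem.List.pyGetD t j ' ' ≠ PySem.List.pyGetD t (k+i+1) ' ' then
      let k' := if PySem.List.pyGetD t j ' ' < PySem.List.pyGetD t (k+i+1) ' ' then j - i - 1 else k
      boothWhile t j f fuel k' (PySem.List.pyGetD f i (-1))
    else (k, i)

def boothStep (t : List Char) (st : List Int × Int) (j : Int) : List Int × Int :=
  let f := st.1
  let k := st.2
  let i0 := PySem.List.pyGetD f (j - k - 1) (-1)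
  let p := boothWhile t j f t.length k i0
  let k1 := p.1
  let i1 := p.2
  if PySem.List.pyGetD t j ' ' ≠ PySem.List.pyGetD t (k1+i1+1) ' ' then
    let k2 := if PySem.List.pyGetD t j ' ' < PySem.List.pyGetD t k1 ' ' then j else k1
    (PySem.List.pySetD f (j - k2) (-1), k2)
  else
    (PySem.List.pySetD f (j - k1) (i1+1), k1)

def min_lex_cyclic_shift (S : String) : String :=
  let t := S.toList ++ S.toList
  let n : Int := PySem.Int.floordiv (t.length : Int) 2
  let f0 : List Int := List.replicate (2*n).toNat (-1)
  let r := (PySem.List.pyRange 1 (2*n) 1).foldl (boothStep t) (f0, 0)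
  String.ofList (PySem.List.slice t (some r.2) (some (r.2 + n)))


-- ===== PORT B =====
def min_lex_cyclic_shift_alt (S : String) : String :=
  let l := S.toList
  let n : Int := (l.length : Int)
  let rots := (PySem.List.pyRange 0 n 1).map (fun i =>
    String.ofList (PySem.List.slice l (some i) none ++ PySem.List.slice l none (some i)))
  PySem.List.minD rots (fun x => x) ""



-- ===== PRECONDITION & SPEC =====
def Spec_min_lex_cyclic_shift (S : String) (out : String) : Prop := out = min_lex_cyclic_shift_alt S
instance (S : String) (out : String) : Decidable (Spec_min_lex_cyclic_shift S out) := by unfold Spec_min_lex_cyclic_shift; infer_instance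

-- ===== CLAIM (what is proved, stated in full; the proofs are below) =====
def Claim_equal_min_lex_cyclic_shift : Prop := ∀ (S : String), Dom_min_lex_cyclic_shift S → Spec_min_lex_cyclic_shift S (min_lex_cyclic_shift S)

-- ===== LEMMAS AND PROOFS =====

-- character at index i of the doubled string
def bch (c : List Char) (i : Nat) : Char := (c ++ c).getD i ' '

-- equal windows of length L starting at m1, m2 (character-wise)
def wEq (c : List Char) (m1 m2 L : Nat) : Prop := ∀ x, x < L → bch c (m1+x) = bch c (m2+x)
def wLt (c : List Char) (m1 m2 L : Nat) : Prop :=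
  ∃ p, p < L ∧ (∀ x, x < p → bch c (m1+x) = bch c (m2+x)) ∧ bch c (m1+p) < bch c (m2+p)
def wLe (c : List Char) (m1 m2 L : Nat) : Prop := wLt c m1 m2 L ∨ wEq c m1 m2 L

theorem wEq_refl (c : List Char) (m L : Nat) : wEq c m m L := fun _ _ => rfl
theorem wEq_symm {c : List Char} {m1 m2 L} (h : wEq c m1 m2 L) : wEq c m2 m1 L :=
  fun x hx => (h x hx).symm
theorem wEq_trans {c : List Char} {m1 m2 m3 L} (h1 : wEq c m1 m2 L) (h2 : wEq c m2 m3 L) :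
    wEq c m1 m3 L := fun x hx => (h1 x hx).trans (h2 x hx)
theorem wEq_mono {c : List Char} {m1 m2 L L'} (h : wEq c m1 m2 L) (hL : L' ≤ L) :
    wEq c m1 m2 L' := fun x hx => h x (lt_of_lt_of_le hx hL)
theorem wLt_mono {c : List Char} {m1 m2 L L'} (h : wLt c m1 m2 L) (hL : L ≤ L') :
    wLt c m1 m2 L' := by
  obtain ⟨p, hp, he, hlt⟩ := h
  exact ⟨p, by omega, he, hlt⟩
theorem wLt_not_wEq {c : List Char} {m1 m2 L} (h : wLt c m1 m2 L) : ¬ wEq c m1 m2 L := by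
  obtain ⟨p, hp, _, hlt⟩ := h
  intro he
  exact absurd (he p hp) (ne_of_lt hlt)
theorem wTotal (c : List Char) (m1 m2 L : Nat) :
    wEq c m1 m2 L ∨ wLt c m1 m2 L ∨ wLt c m2 m1 L := by
  induction L with
  | zero => exact Or.inl (fun x hx => absurd hx (by omega))
  | succ L ih =>
    rcases ih with he | hl | hl
    · rcases lt_trichotomy (bch c (m1+L)) (bch c (m2+L)) with h | h | h
      · exact Or.inr (Or.inl ⟨L, by omega, fun x hx => he x hx, h⟩)
      · exact Or.inl (fun x hx => by
          rcases Nat.lt_or_ge x L with h' | h'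
          · exact he x h'
          · have : x = L := by omega
            simpa [this] using h)
      · exact Or.inr (Or.inr ⟨L, by omega, fun x hx => (he x hx).symm, h⟩)
    · exact Or.inr (Or.inl (wLt_mono hl (by omega)))
    · exact Or.inr (Or.inr (wLt_mono hl (by omega)))
theorem wLe_trunc {c : List Char} {m1 m2 L L'} (h : wLe c m1 m2 L) (hL : L' ≤ L) :
    wLe c m1 m2 L' := by
  rcases h with ⟨p, hp, he, hlt⟩ | he
  · rcases Nat.lt_or_ge p L' with h' | h'
    · exact Or.inl ⟨p, h', he, hlt⟩
    · exact Or.inr (fun x hx => he x (by omega))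
  · exact Or.inr (wEq_mono he hL)
theorem wLt_of_wLt_of_wEq {c : List Char} {m1 m2 m3 L} (h1 : wLt c m1 m2 L) (h2 : wEq c m2 m3 L) :
    wLt c m1 m3 L := by
  obtain ⟨p, hp, he, hlt⟩ := h1
  exact ⟨p, hp, fun x hx => (he x hx).trans (h2 x (by omega)), by rw [← h2 p hp]; exact hlt⟩
theorem wLt_of_wEq_of_wLt {c : List Char} {m1 m2 m3 L} (h1 : wEq c m1 m2 L) (h2 : wLt c m2 m3 L) :
    wLt c m1 m3 L := by
  obtain ⟨p, hp, he, hlt⟩ := h2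
  exact ⟨p, hp, fun x hx => (h1 x (by omega)).trans (he x hx), by rw [h1 p hp]; exact hlt⟩
theorem wLt_trans {c : List Char} {m1 m2 m3 L} (h1 : wLt c m1 m2 L) (h2 : wLt c m2 m3 L) :
    wLt c m1 m3 L := by
  obtain ⟨p1, hp1, he1, hlt1⟩ := h1
  obtain ⟨p2, hp2, he2, hlt2⟩ := h2
  rcases lt_trichotomy p1 p2 with h | h | h
  · exact ⟨p1, hp1, fun x hx => (he1 x hx).trans (he2 x (by omega)), by
      rw [← he2 p1 h]; exact hlt1⟩
  · subst h
    exact ⟨p1, hp1, fun x hx => (he1 x hx).trans (he2 x hx), lt_trans hlt1 hlt2⟩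
  · exact ⟨p2, hp2, fun x hx => (he1 x (by omega)).trans (he2 x hx), by
      rw [he1 p2 h]; exact hlt2⟩
theorem wLt_of_wLt_of_wLe {c : List Char} {m1 m2 m3 L} (h1 : wLt c m1 m2 L) (h2 : wLe c m2 m3 L) :
    wLt c m1 m3 L := by
  rcases h2 with h2 | h2
  · exact wLt_trans h1 h2
  · exact wLt_of_wLt_of_wEq h1 h2
theorem wLe_trans {c : List Char} {m1 m2 m3 L} (h1 : wLe c m1 m2 L) (h2 : wLe c m2 m3 L) :
    wLe c m1 m3 L := by
  rcases h1 with h1 | h1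
  · exact Or.inl (wLt_of_wLt_of_wLe h1 h2)
  · rcases h2 with h2 | h2
    · exact Or.inl (wLt_of_wEq_of_wLt h1 h2)
    · exact Or.inr (wEq_trans h1 h2)
theorem wLe_of_wEq {c : List Char} {m1 m2 L} (h : wEq c m1 m2 L) : wLe c m1 m2 L := Or.inr h
-- border predicate as a Bool (to use Nat.findGreatest without new instances)
def brdB (c : List Char) (k L b : Nat) : Bool :=
  decide (b < L) && (List.range b).all (fun x => bch c (k+x) == bch c (k+L-b+x))

theorem brdB_iff {c k L b} : brdB c k L b = true ↔ (b < L ∧ wEq c k (k+L-b) b) := by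
  simp [brdB, wEq, List.all_eq_true]

-- longest proper border length of the window of length L starting at k
def maxB (c : List Char) (k L : Nat) : Nat :=
  Nat.findGreatest (fun b => brdB c k L b = true) (L-1)

theorem bch_congr {c : List Char} {i j : Nat} (h : i = j) : bch c i = bch c j := by rw [h]

theorem maxB_brd {c k L} (hL : 1 ≤ L) : brdB c k L (maxB c k L) = true := by
  unfold maxB
  exact Nat.findGreatest_spec (P := fun b => brdB c k L b = true) (m := 0) (by omega)
    (brdB_iff.mpr ⟨by omega, fun x hx => absurd hx (by omega)⟩)
theorem maxB_lt {c k L} (hL : 1 ≤ L) : maxB c k L < L :=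
  lt_of_le_of_lt (Nat.findGreatest_le _) (by omega)
theorem le_maxB {c k L b} (h : brdB c k L b = true) : b ≤ maxB c k L := by
  have h' := brdB_iff.mp h
  exact Nat.le_findGreatest (by omega) h
-- a shorter "suffix-match" is a border of a longer one
theorem maxB_congr {c k k' L} (h : wEq c k k' L) : maxB c k L = maxB c k' L := by
  have key : ∀ b, brdB c k L b = true ↔ brdB c k' L b = true := by
    intro b
    rw [brdB_iff, brdB_iff]
    constructor
    · rintro ⟨hb, he⟩
      refine ⟨hb, fun x hx => ?_⟩
      calc bch c (k' + x) = bch c (k + x) := (h x (by omega)).symm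
        _ = bch c (k + L - b + x) := he x hx
        _ = bch c (k + (L - b + x)) := bch_congr (by omega)
        _ = bch c (k' + (L - b + x)) := h (L - b + x) (by omega)
        _ = bch c (k' + L - b + x) := bch_congr (by omega)
    · rintro ⟨hb, he⟩
      refine ⟨hb, fun x hx => ?_⟩
      calc bch c (k + x) = bch c (k' + x) := h x (by omega)
        _ = bch c (k' + L - b + x) := he x hx
        _ = bch c (k' + (L - b + x)) := bch_congr (by omega)
        _ = bch c (k + (L - b + x)) := (h (L - b + x) (by omega)).symm
        _ = bch c (k + L - b + x) := bch_congr (by omega)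
  rcases Nat.eq_zero_or_pos L with hL | hL
  · subst hL; rfl
  · apply le_antisymm
    · exact le_maxB ((key _).mp (maxB_brd hL))
    · exact le_maxB ((key _).mpr (maxB_brd hL))
theorem maxB_one (c : List Char) (k : Nat) : maxB c k 1 = 0 := by
  simp [maxB]

theorem wLt_irrefl {c : List Char} {m L : Nat} (h : wLt c m m L) : False :=
  wLt_not_wEq h (wEq_refl c m L)
theorem wLe_one_iff {c : List Char} {m1 m2 : Nat} : wLe c m1 m2 1 ↔ bch c m1 ≤ bch c m2 := by
  constructor
  · rintro (⟨p, hp, _, hlt⟩ | he)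
    · have : p = 0 := by omega
      subst this
      simpa using le_of_lt hlt
    · simpa using le_of_eq (he 0 (by omega))
  · intro h
    rcases lt_or_eq_of_le h with h | h
    · exact Or.inl ⟨0, by omega, fun x hx => absurd hx (by omega), by simpa using h⟩
    · exact Or.inr (fun x hx => by
        have : x = 0 := by omega
        subst this
        simpa using h)
theorem wLt_one_iff {c : List Char} {m1 m2 : Nat} : wLt c m1 m2 1 ↔ bch c m1 < bch c m2 := by
  constructor
  · rintro ⟨p, hp, _, hlt⟩
    have : p = 0 := by omega
    subst this
    simpa using hlt
  · intro h
    exact ⟨0, by omega, fun x hx => absurd hx (by omega), by simpa using h⟩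

theorem getD_set' (l : List Nat) (i v m : Nat) :
    (l.set i v).getD m 0 = if m = i ∧ i < l.length then v else l.getD m 0 := by
  simp only [List.getD, List.getElem?_set]
  split_ifs with h1 h2 h3 h4 <;> simp_all

-- ===== the abstract (Nat-level) machine =====
def mdesc (c : List Char) (J : Nat) (F : List Nat) : Nat → Nat → Nat → Nat × Nat
  | 0, k, b => (k, b)
  | fuel+1, k, b =>
    if b ≠ 0 ∧ bch c J ≠ bch c (k+b) then
      mdesc c J F fuel (if bch c J < bch c (k+b) then J - b else k) (F.getD (b-1) 0)
    else (k, b)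

def mstep (c : List Char) (N : Nat) (st : List Nat × Nat) (J : Nat) : List Nat × Nat :=
  let F := st.1
  let k := st.2
  let p := mdesc c J F N k (F.getD (J - k - 1) 0)
  if bch c J ≠ bch c (p.1 + p.2) then
    let k2 := if bch c J < bch c p.1 then J else p.1
    (F.set (J - k2) 0, k2)
  else (F.set (J - p.1) (p.2 + 1), p.1)

-- descent postcondition bundle
def DInv (c : List Char) (J K0 k b : Nat) : Prop :=
  K0 ≤ k ∧ b < J - k ∧
  wEq c K0 (J - b) b ∧
  wEq c k K0 (J - k) ∧
  (∀ b', b < b' → b' < J - k → wEq c K0 (J - b') b' → bch c (K0 + b') ≠ bch c J) ∧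
  (∀ m, k < m → m < J → (1 ≤ J - m ∧ J - m ≤ b ∧ wEq c K0 m (J - m)) ∨ wLe c k m (J + 1 - m)) ∧
  (∀ m, m < k → wLt c k m (J - k + 1))

theorem desc_spec (c : List Char) (J K0 : Nat) (F : List Nat)
    (hF : ∀ m, m < J - K0 → F.getD m 0 = maxB c K0 (m+1)) :
    ∀ b k fuel, b < fuel → DInv c J K0 k b →
    ((mdesc c J F fuel k b).2 = 0 ∨
       bch c J = bch c ((mdesc c J F fuel k b).1 + (mdesc c J F fuel k b).2)) ∧
    DInv c J K0 (mdesc c J F fuel k b).1 (mdesc c J F fuel k b).2 := by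
  intro b
  induction b using Nat.strong_induction_on with
  | _ b ih =>
    intro k fuel hfuel hD
    obtain ⟨hK0k, hbk, hD1, hD2, hDMax, hD3, hD4⟩ := hD
    match fuel, hfuel with
    | fuel+1, hfuel =>
      by_cases hc : b ≠ 0 ∧ bch c J ≠ bch c (k+b)
      case neg =>
        rw [mdesc, if_neg hc]
        refine ⟨?_, hK0k, hbk, hD1, hD2, hDMax, hD3, hD4⟩
        push_neg at hc
        by_cases hb0 : b = 0
        · exact Or.inl hb0
        · exact Or.inr (hc hb0)
      case pos =>
        obtain ⟨hb0, hne⟩ := hc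
        have hb1 : 1 ≤ b := by omega
        rw [mdesc, if_pos ⟨hb0, hne⟩]
        -- the new border length
        have hread : F.getD (b-1) 0 = maxB c K0 b := by
          have := hF (b-1) (by omega)
          rw [this]
          congr 1
          omega
        set b' := F.getD (b-1) 0 with hb'def
        have hb'eq : b' = maxB c K0 b := hread
        have hb'lt : b' < b := hb'eq ▸ maxB_lt hb1
        have hb'brd := maxB_brd (c := c) (k := K0) hb1
        rw [← hb'eq] at hb'brd
        rw [brdB_iff] at hb'brd
        obtain ⟨_, hb'wEq⟩ := hb'brd
        -- D1 for b' : wEq c K0 (J - b') b'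
        have hD1' : wEq c K0 (J - b') b' := by
          intro x hx
          calc bch c (K0 + x) = bch c (K0 + b - b' + x) := hb'wEq x hx
            _ = bch c (K0 + (b - b' + x)) := bch_congr (by omega)
            _ = bch c (J - b + (b - b' + x)) := hD1 (b - b' + x) (by omega)
            _ = bch c (J - b' + x) := bch_congr (by omega)
        -- any suffix-match strictly between b' and b is impossible
        have hgap : ∀ b'', b' < b'' → b'' < b → wEq c K0 (J - b'') b'' → False := by
          intro b'' h1 h2 hsm
          have hbrd : brdB c K0 b b'' = true := by
            rw [brdB_iff]
            refine ⟨h2, fun x hx => ?_⟩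
            calc bch c (K0 + x) = bch c (J - b'' + x) := hsm x hx
              _ = bch c (J - b + (b - b'' + x)) := bch_congr (by omega)
              _ = bch c (K0 + (b - b'' + x)) := (hD1 (b - b'' + x) (by omega)).symm
              _ = bch c (K0 + b - b'' + x) := bch_congr (by omega)
          have := le_maxB hbrd
          omega
        -- pattern prefixes at (J-b) and k agree for b characters
        have hpre : wEq c (J - b) k b := by
          have e1 : wEq c (J - b) K0 b := wEq_symm hD1
          have e2 : wEq c K0 k b := wEq_symm (wEq_mono hD2 (by omega))
          exact wEq_trans e1 e2
        by_cases hlt : bch c J < bch c (k+b)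
        case pos =>
          -- candidate moves to J - b
          rw [if_pos hlt]
          -- strict defeat of old candidate at length b+1
          have hstrict : wLt c (J - b) k (b+1) := by
            refine ⟨b, by omega, fun x hx => hpre x hx, ?_⟩
            have : J - b + b = J := by omega
            rw [this]
            exact hlt
          have hJb : J - (J - b) = b := by omega
          have hnewD : DInv c J K0 (J - b) b' := by
            refine ⟨by omega, by omega, hD1', by rw [hJb]; exact wEq_symm hD1, ?_, ?_, ?_⟩
            · -- DMax
              rw [hJb]
              intro b'' h1 h2 hsm
              exact absurd hsm (fun h => hgap b'' h1 (by omega) h)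
            · -- D3
              intro m hm1 hm2
              rcases hD3 m (by omega) hm2 with ⟨hp1, hp2, hp3⟩ | hwle
              · -- previously pending
                rcases Nat.lt_or_ge (J - m) b with hc2 | hc2
                · rcases Nat.lt_or_ge b' (J - m) with hc3 | hc3
                  · exact absurd hp3 (fun h => hgap (J - m) hc3 hc2 (by
                      have : J - (J - m) = m := by omega
                      rw [this]; exact h))
                  · exact Or.inl ⟨hp1, hc3, hp3⟩
                · -- J - m = b, i.e. m = J - b: excluded since m > J - b
                  omega
              · -- previously defeated by k; transfer to J - b
                refine Or.inr (wLe_trans (wLe_of_wEq (wEq_mono hpre (by omega))) hwle)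
            · -- D4
              rw [hJb]
              intro m hm
              rcases Nat.lt_trichotomy m k with h | h | h
              · -- m < k : old D4 truncated, then strict via new candidate
                have h1 : wLe c k m (b+1) := wLe_trunc (Or.inl (hD4 m h)) (by omega)
                exact wLt_of_wLt_of_wLe hstrict h1
              · subst h
                exact hstrict
              · -- k < m < J - b : old D3, necessarily non-pending
                rcases hD3 m h (by omega) with ⟨hp1, hp2, hp3⟩ | hwle
                · omega
                · have h1 : wLe c k m (b+1) := wLe_trunc hwle (by omega)
                  exact wLt_of_wLt_of_wLe hstrict h1
          exact ih b' hb'lt (J - b) fuel (by omega) hnewD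
        case neg =>
          rw [if_neg hlt]
          have hgt : bch c (k+b) < bch c J := by
            rcases lt_trichotomy (bch c J) (bch c (k+b)) with h | h | h
            · exact absurd h hlt
            · exact absurd h hne
            · exact h
          have hnewD : DInv c J K0 k b' := by
            refine ⟨hK0k, by omega, hD1', hD2, ?_, ?_, hD4⟩
            · -- DMax
              intro b'' h1 h2 hsm
              rcases Nat.lt_trichotomy b'' b with h3 | h3 | h3
              · exact absurd hsm (fun h => hgap b'' h1 h3 h)
              · subst h3
                intro hchar
                have : bch c (k + b'') = bch c (K0 + b'') := hD2 b'' (by omega)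
                rw [this, hchar] at hgt
                exact lt_irrefl _ hgt
              · exact hDMax b'' h3 h2 hsm
            · -- D3
              intro m hm1 hm2
              rcases hD3 m hm1 hm2 with ⟨hp1, hp2, hp3⟩ | hwle
              · rcases Nat.lt_or_ge (J - m) b with hc2 | hc2
                · rcases Nat.lt_or_ge b' (J - m) with hc3 | hc3
                  · exact absurd hp3 (fun h => hgap (J - m) hc3 hc2 (by
                      have : J - (J - m) = m := by omega
                      rw [this]; exact h))
                  · exact Or.inl ⟨hp1, hc3, hp3⟩
                · -- J - m = b : m = J - b is now strictly defeated by k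
                  have hm : m = J - b := by omega
                  subst hm
                  refine Or.inr (Or.inl ?_)
                  have : J + 1 - (J - b) = b + 1 := by omega
                  rw [this]
                  refine ⟨b, by omega, fun x hx => (hpre x hx).symm, ?_⟩
                  have : J - b + b = J := by omega
                  rw [this]
                  exact hgt
              · exact Or.inr hwle
          exact ih b' hb'lt k fuel (by omega) hnewD

def BInv (c : List Char) (j : Nat) (F : List Nat) (K : Nat) : Prop :=
  K < j ∧ F.length = 2 * c.length ∧
  (∀ m, F.getD m 0 ≤ m) ∧
  (∀ m, m < j - K → F.getD m 0 = maxB c K (m+1)) ∧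
  (∀ m, K < m → m < j → wLe c K m (j - m)) ∧
  (∀ m, m < K → wLt c K m (j - K))

theorem inv_step (c : List Char) (J : Nat) (F : List Nat) (K : Nat)
    (hInv : BInv c J F K) (hJ1 : 1 ≤ J) (hJN : J < 2 * c.length) :
    BInv c (J+1) (mstep c (2 * c.length) (F, K) J).1 (mstep c (2 * c.length) (F, K) J).2 := by
  obtain ⟨hKJ, hlen, hFle, hFval, hI4, hI5⟩ := hInv
  -- entry facts for the descent
  have hl0 : 1 ≤ J - K := by omega
  have hb0 : F.getD (J - K - 1) 0 = maxB c K (J - K) := by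
    have := hFval (J - K - 1) (by omega)
    rw [this]
    congr 1
    omega
  have hmaxlt := maxB_lt (c := c) (k := K) hl0
  have hmaxbrd := maxB_brd (c := c) (k := K) hl0
  rw [brdB_iff] at hmaxbrd
  have hEntry : DInv c J K K (F.getD (J - K - 1) 0) := by
    rw [hb0]
    refine ⟨le_refl K, by omega, ?_, wEq_refl c K (J - K), ?_, ?_, ?_⟩
    · -- D1
      intro x hx
      have := hmaxbrd.2 x hx
      calc bch c (K + x) = bch c (K + (J - K) - maxB c K (J - K) + x) := this
        _ = bch c (J - maxB c K (J - K) + x) := bch_congr (by omega)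
    · -- DMax from maximality
      intro b' h1 h2 hsm
      have hbrd : brdB c K (J - K) b' = true := by
        rw [brdB_iff]
        refine ⟨h2, fun x hx => ?_⟩
        calc bch c (K + x) = bch c (J - b' + x) := hsm x hx
          _ = bch c (K + (J - K) - b' + x) := bch_congr (by omega)
      have := le_maxB hbrd
      omega
    · -- D3 from I4 and totality
      intro m hm1 hm2
      rcases wTotal c K m (J - m) with he | hl | hl
      · -- tie: pending
        refine Or.inl ⟨by omega, ?_, he⟩
        have hbrd : brdB c K (J - K) (J - m) = true := by
          rw [brdB_iff]
          refine ⟨by omega, fun x hx => ?_⟩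
          calc bch c (K + x) = bch c (m + x) := he x hx
            _ = bch c (K + (J - K) - (J - m) + x) := bch_congr (by omega)
        have := le_maxB hbrd
        omega
      · exact Or.inr (Or.inl (wLt_mono hl (by omega)))
      · exact absurd (wLt_of_wLt_of_wLe hl (hI4 m hm1 hm2)) wLt_irrefl
    · -- D4 from I5
      intro m hm
      exact wLt_mono (hI5 m hm) (by omega)
  have hdesc := desc_spec c J K F (by
      intro m hm
      exact hFval m hm) (F.getD (J - K - 1) 0) K (2 * c.length) (by omega) hEntry
  set r := mdesc c J F (2 * c.length) K (F.getD (J - K - 1) 0) with hr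
  obtain ⟨hexit, hK0k1, hb1, hxD1, hxD2, hxDMax, hxD3, hxD4⟩ := hdesc
  set k1 := r.1
  set b1 := r.2
  have hk1J : k1 < J := by omega
  -- agreement of prefixes lets us move maxB between K and k1
  have hcongr : ∀ L, L ≤ J - k1 → maxB c k1 L = maxB c K L := by
    intro L hL
    exact maxB_congr (wEq_mono hxD2 hL)
  by_cases hmatch : bch c J ≠ bch c (k1 + b1)
  case pos =>
    -- b1 = 0 and mismatch
    have hb10 : b1 = 0 := by
      rcases hexit with h | h
      · exact h
      · exact absurd h hmatch
    have hneK : bch c J ≠ bch c k1 := by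
      have : k1 + b1 = k1 := by omega
      rw [this] at hmatch
      exact hmatch
    -- the new failure entry is 0 in both mismatch branches
    have hmax0 : ∀ k', k' = k1 → bch c k' ≠ bch c J → maxB c k' (J - k' + 1) = 0 := by
      intro k' hk' hne
      subst hk'
      unfold maxB
      rw [Nat.findGreatest_eq_zero_iff]
      intro b'' hb''0 hb''le hbrd
      rw [brdB_iff] at hbrd
      obtain ⟨hb''lt, hb''eq⟩ := hbrd
      rcases Nat.eq_or_lt_of_le hb''0 with h1 | h1
      · -- b'' = 1 : would mean bch k1 = bch J
        have := hb''eq 0 (by omega)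
        have e1 : k1 + (J - k1 + 1) - b'' + 0 = J := by omega
        rw [e1] at this
        exact hne (by simpa using this)
      · -- b'' ≥ 2 : contradicts DMax at b := b'' - 1
        have hb : b'' - 1 < J - k1 := by omega
        have hsm : wEq c K (J - (b''-1)) (b''-1) := by
          intro x hx
          calc bch c (K + x) = bch c (k1 + x) := (hxD2 x (by omega)).symm
            _ = bch c (k1 + (J - k1 + 1) - b'' + x) := hb''eq x (by omega)
            _ = bch c (J - (b''-1) + x) := bch_congr (by omega)
        have hchar : bch c (K + (b''-1)) = bch c J := by
          calc bch c (K + (b''-1)) = bch c (k1 + (b''-1)) := (hxD2 (b''-1) (by omega)).symm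
            _ = bch c (k1 + (J - k1 + 1) - b'' + (b''-1)) := hb''eq (b''-1) (by omega)
            _ = bch c J := bch_congr (by omega)
        exact hxDMax (b''-1) (by omega) hb hsm hchar
    by_cases hmove : bch c J < bch c k1
    case pos =>
      -- k2 = J
      have hstep : mstep c (2 * c.length) (F, K) J = (F.set (J - J) 0, J) := by
        rw [mstep]
        simp only [← hr]
        rw [if_pos hmatch, if_pos hmove]
      rw [hstep]
      refine ⟨by omega, by rw [List.length_set]; exact hlen, ?_, ?_, ?_, ?_⟩
      · intro m
        rw [getD_set']
        split_ifs with h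
        · omega
        · exact hFle m
      · intro m hm
        have hm0 : m = 0 := by omega
        subst hm0
        rw [getD_set']
        rw [if_pos ⟨by omega, by omega⟩]
        rw [maxB_one]
      · intro m hm1 hm2
        omega
      · -- every earlier position is strictly larger at length 1
        intro m hm
        have e : J + 1 - J = 1 := by omega
        rw [e, wLt_one_iff]
        have hk1m : bch c k1 ≤ bch c m := by
          rcases Nat.lt_trichotomy m k1 with h | h | h
          · have := wLe_trunc (Or.inl (hxD4 m h)) (show 1 ≤ J - k1 + 1 by omega)
            exact wLe_one_iff.mp this
          · subst h
            exact le_refl _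
          · rcases hxD3 m h hm with ⟨hp1, hp2, _⟩ | hwle
            · omega
            · exact wLe_one_iff.mp (wLe_trunc hwle (by omega))
        exact lt_of_lt_of_le hmove hk1m
    case neg =>
      -- k2 = k1, new failure entry 0
      have hstep : mstep c (2 * c.length) (F, K) J = (F.set (J - k1) 0, k1) := by
        rw [mstep]
        simp only [← hr]
        rw [if_pos hmatch, if_neg hmove]
      rw [hstep]
      have hgtk : bch c k1 < bch c J := by
        rcases lt_trichotomy (bch c J) (bch c k1) with h | h | h
        · exact absurd h hmove
        · exact absurd h hneK
        · exact h
      refine ⟨by omega, by rw [List.length_set]; exact hlen, ?_, ?_, ?_, ?_⟩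
      · intro m
        rw [getD_set']
        split_ifs with h
        · omega
        · exact hFle m
      · intro m hm
        rw [getD_set']
        rcases Nat.lt_or_ge m (J - k1) with h | h
        · rw [if_neg (by omega)]
          rw [hFval m (by omega)]
          exact (hcongr (m+1) (by omega)).symm
        · have hm' : m = J - k1 := by omega
          subst hm'
          rw [if_pos ⟨rfl, by rw [hlen]; omega⟩]
          exact (hmax0 k1 rfl (fun h => hneK h.symm)).symm
      · -- I4
        intro m hm1 hm2
        rcases Nat.lt_or_ge m J with h | h
        · rcases hxD3 m hm1 h with ⟨hp1, hp2, _⟩ | hwle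
          · omega
          · have e : J + 1 - m = J + 1 - m := rfl
            exact hwle
        · have hmJ : m = J := by omega
          have e : J + 1 - m = 1 := by omega
          rw [e, wLe_one_iff, hmJ]
          exact le_of_lt hgtk
      · -- I5
        intro m hm
        have e : J + 1 - k1 = J - k1 + 1 := by omega
        rw [e]
        exact hxD4 m hm
  case neg =>
    -- match: new failure entry b1 + 1
    push_neg at hmatch
    have hstep : mstep c (2 * c.length) (F, K) J = (F.set (J - k1) (b1 + 1), k1) := by
      rw [mstep]
      simp only [← hr]
      rw [if_neg (by simpa using hmatch)]
    rw [hstep]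
    have hb1lt : b1 < J - k1 := hb1
    -- the K1 claim: maxB c k1 (J - k1 + 1) = b1 + 1
    have hK1 : maxB c k1 (J - k1 + 1) = b1 + 1 := by
      have hub : brdB c k1 (J - k1 + 1) (b1 + 1) = true := by
        rw [brdB_iff]
        refine ⟨by omega, fun x hx => ?_⟩
        rcases Nat.lt_or_ge x b1 with h | h
        · calc bch c (k1 + x) = bch c (K + x) := hxD2 x (by omega)
            _ = bch c (J - b1 + x) := hxD1 x h
            _ = bch c (k1 + (J - k1 + 1) - (b1 + 1) + x) := bch_congr (by omega)
        · have hx1 : x = b1 := by omega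
          subst hx1
          calc bch c (k1 + b1) = bch c J := hmatch.symm
            _ = bch c (k1 + (J - k1 + 1) - (b1 + 1) + b1) := bch_congr (by omega)
      have hle1 : b1 + 1 ≤ maxB c k1 (J - k1 + 1) := le_maxB hub
      by_contra hne2
      have hgt2 : b1 + 1 < maxB c k1 (J - k1 + 1) := by omega
      have hBlt := maxB_lt (c := c) (k := k1) (L := J - k1 + 1) (by omega)
      have hBbrd := maxB_brd (c := c) (k := k1) (L := J - k1 + 1) (by omega)
      rw [brdB_iff] at hBbrd
      obtain ⟨_, hBeq⟩ := hBbrd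
      set B := maxB c k1 (J - k1 + 1) with hBdef
      have hb : B - 1 < J - k1 := by omega
      have hsm : wEq c K (J - (B-1)) (B-1) := by
        intro x hx
        calc bch c (K + x) = bch c (k1 + x) := (hxD2 x (by omega)).symm
          _ = bch c (k1 + (J - k1 + 1) - B + x) := hBeq x (by omega)
          _ = bch c (J - (B-1) + x) := bch_congr (by omega)
      have hchar : bch c (K + (B-1)) = bch c J := by
        calc bch c (K + (B-1)) = bch c (k1 + (B-1)) := (hxD2 (B-1) (by omega)).symm
          _ = bch c (k1 + (J - k1 + 1) - B + (B-1)) := hBeq (B-1) (by omega)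
          _ = bch c J := bch_congr (by omega)
      exact hxDMax (B-1) (by omega) hb hsm hchar
    refine ⟨by omega, by rw [List.length_set]; exact hlen, ?_, ?_, ?_, ?_⟩
    · intro m
      rw [getD_set']
      split_ifs with h
      · omega
      · exact hFle m
    · intro m hm
      rw [getD_set']
      rcases Nat.lt_or_ge m (J - k1) with h | h
      · rw [if_neg (by omega)]
        rw [hFval m (by omega)]
        exact (hcongr (m+1) (by omega)).symm
      · have hm' : m = J - k1 := by omega
        subst hm'
        rw [if_pos ⟨rfl, by rw [hlen]; omega⟩]
        have e : J - k1 + 1 = J - k1 + 1 := rfl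
        exact hK1.symm
    · -- I4
      intro m hm1 hm2
      rcases Nat.lt_or_ge m J with hmJ | hmJ
      · rcases hxD3 m hm1 hmJ with ⟨hp1, hp2, hp3⟩ | hwle
        · -- pending m = J - b', resolved by the matched character
          set b' := J - m with hb'def
          have hmval : m = J - b' := by omega
          -- prefix: k1 agrees with m on b' chars
          have hpref : ∀ x, x < b' → bch c (k1 + x) = bch c (m + x) := by
            intro x hx
            calc bch c (k1 + x) = bch c (K + x) := hxD2 x (by omega)
              _ = bch c (m + x) := hp3 x hx
          have hlast : bch c (m + b') = bch c J := bch_congr (by omega)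
          have e : J + 1 - m = b' + 1 := by omega
          rw [e]
          rcases Nat.eq_or_lt_of_le hp2 with hbb | hbb
          · -- b' = b1 : full tie
            refine Or.inr (fun x hx => ?_)
            rcases Nat.lt_or_ge x b' with h | h
            · exact hpref x h
            · have hx1 : x = b' := by omega
              subst hx1
              rw [hlast, hbb]
              exact hmatch.symm
          · -- b' < b1 : compare characters K+b' and K+b1 via I4 at K + b1 - b'
            have hb'brd : wEq c K (K + b1 - b') b' := by
              intro x hx
              calc bch c (K + x) = bch c (J - b' + x) := by
                    rw [← hmval]; exact hp3 x hx
                _ = bch c (J - b1 + (b1 - b' + x)) := bch_congr (by omega)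
                _ = bch c (K + (b1 - b' + x)) := (hxD1 (b1 - b' + x) (by omega)).symm
                _ = bch c (K + b1 - b' + x) := bch_congr (by omega)
            have hm'J : K + b1 - b' < J := by omega
            have hm'K : K < K + b1 - b' := by omega
            have hwle2 := wLe_trunc (hI4 (K + b1 - b') hm'K hm'J) (show b' + 1 ≤ J - (K + b1 - b') by omega)
            -- conclude bch c (K + b') ≤ bch c (K + b1)
            have hchars : bch c (K + b') ≤ bch c (K + b1) := by
              rcases hwle2 with ⟨p, hp, hpe, hplt⟩ | heq
              · rcases Nat.lt_or_ge p b' with h | h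
                · have e2 : bch c (K + b1 - b' + p) = bch c (K + p) := (hb'brd p h).symm
                  rw [e2] at hplt
                  exact absurd hplt (lt_irrefl _)
                · have hp' : p = b' := by omega
                  subst hp'
                  have e2 : bch c (K + b1 - b' + b') = bch c (K + b1) := bch_congr (by omega)
                  rw [e2] at hplt
                  exact le_of_lt hplt
              · have := heq b' (by omega)
                have e2 : bch c (K + b1 - b' + b') = bch c (K + b1) := bch_congr (by omega)
                rw [e2] at this
                exact le_of_eq this
            have hKb1 : bch c (K + b1) = bch c J := by
              calc bch c (K + b1) = bch c (k1 + b1) := (hxD2 b1 (by omega)).symm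
                _ = bch c J := hmatch.symm
            rcases lt_or_eq_of_le hchars with hc2 | hc2
            · refine Or.inl ⟨b', by omega, hpref, ?_⟩
              rw [hlast]
              calc bch c (k1 + b') = bch c (K + b') := hxD2 b' (by omega)
                _ < bch c (K + b1) := hc2
                _ = bch c J := hKb1
            · refine Or.inr (fun x hx => ?_)
              rcases Nat.lt_or_ge x b' with h | h
              · exact hpref x h
              · have hx1 : x = b' := by omega
                subst hx1
                rw [hlast]
                calc bch c (k1 + b') = bch c (K + b') := hxD2 b' (by omega)
                  _ = bch c (K + b1) := hc2
                  _ = bch c J := hKb1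
        · exact hwle
      · -- m = J : first characters compare via I4 at K + b1 (or equality if b1 = 0)
        have hmJ' : m = J := by omega
        have e : J + 1 - m = 1 := by omega
        rw [e, wLe_one_iff, hmJ']
        have h0 : bch c k1 = bch c K := by
          have := hxD2 0 (by omega)
          simpa using this
        rcases Nat.eq_or_lt_of_le (Nat.zero_le b1) with hb10 | hb10
        · have : bch c J = bch c k1 := by
            rw [← hb10] at hmatch
            simpa using hmatch
          exact le_of_eq this.symm
        · have hm'J : K + b1 < J := by omega
          have hwle2 := wLe_trunc (hI4 (K + b1) (by omega) hm'J) (show 1 ≤ J - (K + b1) by omega)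
          have h1 : bch c K ≤ bch c (K + b1) := wLe_one_iff.mp hwle2
          have h2 : bch c (K + b1) = bch c (k1 + b1) := (hxD2 b1 (by omega)).symm
          rw [h0]
          rw [h2, ← hmatch] at h1
          exact h1
    · -- I5
      intro m hm
      have e : J + 1 - k1 = J - k1 + 1 := by omega
      rw [e]
      exact hxD4 m hm

def mrun (c : List Char) (cnt : Nat) : List Nat × Nat :=
  (List.range' 1 cnt).foldl (mstep c (2 * c.length)) (List.replicate (2 * c.length) 0, 0)

theorem getD_replicate0 (k m : Nat) : (List.replicate k (0:Nat)).getD m 0 = 0 := by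
  rcases Nat.lt_or_ge m k with h | h
  · simp [List.getD, h]
  · have : (List.replicate k (0:Nat))[m]? = none := by
      rw [List.getElem?_eq_none_iff]
      simpa using h
    simp [List.getD, this]

theorem mrun_inv (c : List Char) (hn : 1 ≤ c.length) :
    ∀ cnt, cnt ≤ 2 * c.length - 1 → BInv c (cnt + 1) (mrun c cnt).1 (mrun c cnt).2 := by
  intro cnt
  induction cnt with
  | zero =>
    intro _
    have h0 : mrun c 0 = (List.replicate (2 * c.length) 0, 0) := by simp [mrun]
    rw [h0]
    refine ⟨by omega, by simp, ?_, ?_, ?_, ?_⟩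
    · intro m
      rw [getD_replicate0]
      omega
    · intro m hm
      have hm0 : m = 0 := by omega
      subst hm0
      rw [getD_replicate0, maxB_one]
    · intro m hm1 hm2
      omega
    · intro m hm
      omega
  | succ cnt ih =>
    intro hle
    have e2 : 1 + 1 * cnt = cnt + 1 := by omega
    have hrun : mrun c (cnt+1) = mstep c (2 * c.length) ((mrun c cnt).1, (mrun c cnt).2) (cnt + 1) := by
      rw [mrun, List.range'_concat, List.foldl_append, e2]
      rfl
    rw [hrun]
    exact inv_step c (cnt+1) (mrun c cnt).1 (mrun c cnt).2 (ih (by omega)) (by omega) (by omega)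

theorem bch_period (c : List Char) (i : Nat) (h : i < c.length) :
    bch c (i + c.length) = bch c i := by
  unfold bch
  rw [Nat.add_comm i c.length]
  rw [show (c ++ c).getD (c.length + i) ' ' = c.getD i ' ' from by
    simp [List.getD, List.getElem?_append_right]]
  rw [List.getD_append _ _ _ _ h]

theorem mrun_final (c : List Char) (hn : 1 ≤ c.length) :
    (mrun c (2 * c.length - 1)).2 < c.length ∧
    ∀ m, m < c.length → wLe c (mrun c (2 * c.length - 1)).2 m c.length := by
  set n := c.length with hndef
  have hinv := mrun_inv c hn (2 * n - 1) (le_refl _)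
  have hcnt : 2 * n - 1 + 1 = 2 * n := by omega
  rw [hcnt] at hinv
  obtain ⟨hKJ, _, _, _, hI4, hI5⟩ := hinv
  set K := (mrun c (2 * n - 1)).2 with hKdef
  have hKn : K < n := by
    by_contra hge
    push_neg at hge
    -- K ≥ n : rotation K - n is identical, contradicting strictness I5
    have hlt := hI5 (K - n) (by omega)
    apply wLt_not_wEq hlt
    intro x hx
    have hper := bch_period c (K - n + x) (by omega)
    calc bch c (K + x) = bch c (K - n + x + n) := bch_congr (by omega)
      _ = bch c (K - n + x) := bch_period c (K - n + x) (by omega)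
  refine ⟨hKn, fun m hm => ?_⟩
  rcases Nat.lt_trichotomy m K with h | h | h
  · exact wLe_trunc (Or.inl (hI5 m h)) (by omega)
  · subst h
    exact Or.inr (wEq_refl c K n)
  · exact wLe_trunc (hI4 m h (by omega)) (by omega)



theorem sim_desc (c : List Char) (J : Nat) (f : List Int) (F : List Nat)
    (hR : ∀ m : Nat, f.getD m (-1) = (F.getD m 0 : Int) - 1)
    (hFle : ∀ m, F.getD m 0 ≤ m) :
    ∀ (fuel K b : Nat), b ≤ J →
    boothWhile (c ++ c) (J:Int) f fuel (K:Int) ((b:Int) - 1) =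
      (((mdesc c J F fuel K b).1 : Int), ((mdesc c J F fuel K b).2 : Int) - 1) ∧
    (mdesc c J F fuel K b).2 ≤ J := by
  intro fuel
  induction fuel with
  | zero => intro K b hb; exact ⟨rfl, hb⟩
  | succ fuel ih =>
    intro K b hb
    have hchJ : PySem.List.pyGetD (c ++ c) (J:Int) ' ' = bch c J := by
      simp [bch]
    have hcast : (K:Int) + ((b:Int) - 1) + 1 = ((K + b : Nat) : Int) := by push_cast; ring
    have hchKb : PySem.List.pyGetD (c ++ c) ((K:Int) + ((b:Int) - 1) + 1) ' ' = bch c (K + b) := by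
      rw [hcast, PySem.List.pyGetD_natCast]
      rfl
    by_cases hcond : b ≠ 0 ∧ bch c J ≠ bch c (K + b)
    · -- loop iterates
      rw [boothWhile, mdesc, if_pos hcond]
      rw [if_pos (by
        constructor
        · omega
        · rw [hchJ, hchKb]; exact hcond.2)]
      have hbge : 1 ≤ b := by omega
      have hread : PySem.List.pyGetD f ((b:Int) - 1) (-1) = ((F.getD (b-1) 0 : Nat) : Int) - 1 := by
        have e : (b:Int) - 1 = ((b - 1 : Nat) : Int) := by push_cast; omega
        rw [e]
        simp only [PySem.List.pyGetD_natCast]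
        exact hR (b-1)
      have hble : F.getD (b-1) 0 ≤ J := le_trans (le_trans (hFle (b-1)) (by omega)) hb
      by_cases hmv : bch c J < bch c (K + b)
      · rw [if_pos hmv, if_pos (by rw [hchJ, hchKb]; exact hmv)]
        have e2 : (J:Int) - ((b:Int) - 1) - 1 = ((J - b : Nat) : Int) := by push_cast; omega
        rw [e2, hread]
        exact ih (J - b) (F.getD (b-1) 0) hble
      · rw [if_neg hmv, if_neg (by rw [hchJ, hchKb]; exact hmv)]
        rw [hread]
        exact ih K (F.getD (b-1) 0) hble
    · rw [boothWhile, mdesc, if_neg hcond]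
      rw [if_neg (by
        rw [hchJ, hchKb]
        intro hcon
        exact hcond ⟨by omega, hcon.2⟩)]
      exact ⟨rfl, hb⟩

theorem mdesc_le (c : List Char) (J : Nat) (F : List Nat)
    (hFle : ∀ m, F.getD m 0 ≤ m) :
    ∀ (fuel K b : Nat), K ≤ J → b ≤ J →
    (mdesc c J F fuel K b).1 ≤ J ∧ (mdesc c J F fuel K b).2 ≤ J := by
  intro fuel
  induction fuel with
  | zero => intro K b hK hb; exact ⟨hK, hb⟩
  | succ fuel ih =>
    intro K b hK hb
    by_cases h : b ≠ 0 ∧ bch c J ≠ bch c (K + b)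
    · rw [mdesc, if_pos h]
      by_cases h2 : bch c J < bch c (K + b)
      · rw [if_pos h2]
        exact ih (J - b) _ (by omega) (le_trans (hFle (b-1)) (by omega))
      · rw [if_neg h2]
        exact ih K _ hK (le_trans (hFle (b-1)) (by omega))
    · rw [mdesc, if_neg h]
      exact ⟨hK, hb⟩

theorem sim_step (c : List Char) (J : Nat) (f : List Int) (F : List Nat) (K : Nat)
    (hR : ∀ m : Nat, f.getD m (-1) = (F.getD m 0 : Int) - 1)
    (hFle : ∀ m, F.getD m 0 ≤ m)
    (hlenf : f.length = 2 * c.length) (hlenF : F.length = 2 * c.length)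
    (hKJ : K < J) (hJN : J < 2 * c.length) :
    (boothStep (c ++ c) (f, (K:Int)) (J:Int)).2 = ((mstep c (2 * c.length) (F, K) J).2 : Int) ∧
    (∀ m : Nat, (boothStep (c ++ c) (f, (K:Int)) (J:Int)).1.getD m (-1) =
      ((mstep c (2 * c.length) (F, K) J).1.getD m 0 : Int) - 1) ∧
    (boothStep (c ++ c) (f, (K:Int)) (J:Int)).1.length = 2 * c.length ∧
    (mstep c (2 * c.length) (F, K) J).1.length = 2 * c.length := by
  have hb0le : F.getD (J - K - 1) 0 ≤ J := le_trans (hFle _) (by omega)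
  have hi0 : PySem.List.pyGetD f ((J:Int) - (K:Int) - 1) (-1) =
      ((F.getD (J - K - 1) 0 : Nat) : Int) - 1 := by
    have e : (J:Int) - (K:Int) - 1 = ((J - K - 1 : Nat) : Int) := by push_cast; omega
    rw [e, PySem.List.pyGetD_natCast]
    exact hR _
  have hlent : (c ++ c).length = 2 * c.length := by simp; omega
  have hsim := sim_desc c J f F hR hFle (2 * c.length) K (F.getD (J - K - 1) 0) hb0le
  rw [boothStep, mstep]
  simp only [hi0, hlent]
  rw [hsim.1]
  set r := mdesc c J F (2 * c.length) K (F.getD (J - K - 1) 0) with hr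
  have hk1J : r.1 ≤ J := (mdesc_le c J F hFle (2 * c.length) K (F.getD (J - K - 1) 0) (by omega) hb0le).1
  have hb1J : r.2 ≤ J := hsim.2
  have hchJ : PySem.List.pyGetD (c ++ c) (J:Int) ' ' = bch c J := by simp [bch]
  have hcast : (r.1 : Int) + ((r.2:Int) - 1) + 1 = ((r.1 + r.2 : Nat) : Int) := by push_cast; ring
  have hchK1 : PySem.List.pyGetD (c ++ c) ((r.1:Int) + ((r.2:Int) - 1) + 1) ' ' = bch c (r.1 + r.2) := by
    rw [hcast, PySem.List.pyGetD_natCast]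
    rfl
  have hchk1' : PySem.List.pyGetD (c ++ c) (r.1 : Int) ' ' = bch c r.1 := by
    rw [PySem.List.pyGetD_natCast]
    rfl
  have hset : ∀ (i : Nat) (vI : Int) (vN : Nat), i < 2 * c.length → vI = (vN : Int) - 1 →
      (∀ m : Nat, (PySem.List.pySetD f (i:Int) vI).getD m (-1) = ((F.set i vN).getD m 0 : Int) - 1) := by
    intro i vI vN hi hv m
    have h1 : PySem.List.pyGetD (PySem.List.pySetD f (i:Int) vI) ((m:Nat):Int) (-1) =
        if m = i then vI else PySem.List.pyGetD f (m:Int) (-1) :=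
      PySem.List.pyGetD_pySetD_natCast f i m vI (-1) (by omega)
    rw [PySem.List.pyGetD_natCast] at h1
    rw [h1, getD_set']
    split_ifs with h2 h3 h4
    · exact hv
    · exact absurd ⟨h2, by rw [hlenF]; omega⟩ h3
    · omega
    · rw [PySem.List.pyGetD_natCast]
      exact hR m
  by_cases hne : bch c J ≠ bch c (r.1 + r.2)
  · rw [if_pos (by rw [hchJ, hchK1]; exact hne), if_pos hne]
    by_cases hmv : bch c J < bch c r.1
    · rw [if_pos (by rw [hchJ, hchk1']; exact hmv), if_pos hmv]
      have e : (J:Int) - (J:Int) = ((J - J : Nat) : Int) := by push_cast; omega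
      refine ⟨rfl, ?_, ?_, ?_⟩
      · intro m
        have := hset (J - J) (-1) 0 (by omega) (by simp)
        have e2 : (J:Int) - (J:Int) = ((J - J : Nat) : Int) := by push_cast; omega
        rw [e2]
        exact this m
      · rw [PySem.List.length_pySetD]; exact hlenf
      · rw [List.length_set]; exact hlenF
    · rw [if_neg (by rw [hchJ, hchk1']; exact hmv), if_neg hmv]
      refine ⟨rfl, ?_, ?_, ?_⟩
      · intro m
        have e2 : (J:Int) - (r.1:Int) = ((J - r.1 : Nat) : Int) := by push_cast; omega
        rw [e2]
        exact hset (J - r.1) (-1) 0 (by omega) (by simp) m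
      · rw [PySem.List.length_pySetD]; exact hlenf
      · rw [List.length_set]; exact hlenF
  · rw [if_neg (by rw [hchJ, hchK1]; simpa using hne), if_neg hne]
    refine ⟨rfl, ?_, ?_, ?_⟩
    · intro m
      have e2 : (J:Int) - (r.1:Int) = ((J - r.1 : Nat) : Int) := by push_cast; omega
      rw [e2]
      have ev : (r.2:Int) - 1 + 1 = ((r.2 + 1 : Nat) : Int) - 1 := by push_cast; ring
      exact hset (J - r.1) ((r.2:Int) - 1 + 1) (r.2 + 1) (by omega) ev m
    · rw [PySem.List.length_pySetD]; exact hlenf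
    · rw [List.length_set]; exact hlenF

theorem pyRange_one_natCast (N : Nat) :
    PySem.List.pyRange 1 (N:Int) 1 = (List.range' 1 (N-1)).map (fun k : Nat => (k : Int)) := by
  induction N with
  | zero => decide
  | succ N ih =>
    rcases Nat.eq_zero_or_pos N with h | h
    · subst h; decide
    · have e : ((N+1 : Nat) : Int) = (N:Int) + 1 := by push_cast; ring
      rw [e, PySem.List.pyRange_one_succ_right (by omega), ih]
      have e2 : N + 1 - 1 = (N - 1) + 1 := by omega
      rw [e2, List.range'_concat]
      rw [List.map_append]
      congr 1
      simp
      omega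

theorem getD_replicateI (k m : Nat) : (List.replicate k (-1:Int)).getD m (-1) = -1 := by
  rcases Nat.lt_or_ge m k with h | h
  · simp [List.getD, h]
  · have : (List.replicate k (-1:Int))[m]? = none := by
      rw [List.getElem?_eq_none_iff]
      simpa using h
    simp [List.getD, this]

def portRun (c : List Char) (cnt : Nat) : List Int × Int :=
  (List.range' 1 cnt).foldl (fun st (j : Nat) => boothStep (c ++ c) st (j:Int))
    (List.replicate (2*c.length) (-1), 0)

theorem sim_run (c : List Char) (hn : 1 ≤ c.length) :
    ∀ cnt, cnt ≤ 2 * c.length - 1 →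
    (portRun c cnt).2 = ((mrun c cnt).2 : Int) ∧
    (∀ m : Nat, (portRun c cnt).1.getD m (-1) = ((mrun c cnt).1.getD m 0 : Int) - 1) ∧
    (portRun c cnt).1.length = 2 * c.length ∧
    (mrun c cnt).1.length = 2 * c.length := by
  intro cnt
  induction cnt with
  | zero =>
    intro _
    have h1 : portRun c 0 = (List.replicate (2*c.length) (-1), 0) := rfl
    have h2 : mrun c 0 = (List.replicate (2*c.length) 0, 0) := by simp [mrun]
    rw [h1, h2]
    refine ⟨rfl, ?_, by simp, by simp⟩
    intro m
    rw [getD_replicateI, getD_replicate0]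
    simp
  | succ cnt ih =>
    intro hle
    obtain ⟨ih1, ih2, ih3, ih4⟩ := ih (by omega)
    have e2 : 1 + 1 * cnt = cnt + 1 := by omega
    have hP : portRun c (cnt+1) = boothStep (c ++ c) ((portRun c cnt).1, ((mrun c cnt).2 : Int)) ((cnt+1 : Nat) : Int) := by
      rw [portRun, List.range'_concat, List.foldl_append, e2]
      have : portRun c cnt = ((portRun c cnt).1, ((mrun c cnt).2 : Int)) := by
        rw [← ih1]
      rw [← this]
      rfl
    have hM : mrun c (cnt+1) = mstep c (2 * c.length) ((mrun c cnt).1, (mrun c cnt).2) (cnt + 1) := by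
      rw [mrun, List.range'_concat, List.foldl_append, e2]
      rfl
    have hinv := mrun_inv c hn cnt (by omega)
    have hs := sim_step c (cnt+1) (portRun c cnt).1 (mrun c cnt).1 (mrun c cnt).2
      ih2 hinv.2.2.1 ih3 ih4 hinv.1 (by omega)
    rw [hP, hM]
    exact hs

def win (c : List Char) (m L : Nat) : List Char := ((c ++ c).drop m).take L

theorem win_cons (c : List Char) (m L : Nat) (h : m < 2*c.length) :
    win c m (L+1) = bch c m :: win c (m+1) L := by
  unfold win
  have hm : m < (c++c).length := by simp; omega
  rw [List.drop_eq_getElem_cons hm, List.take_succ_cons]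
  congr 1
  unfold bch
  rw [List.getD_eq_getElem _ _ hm]

theorem wEq_win {c : List Char} {m1 m2 L : Nat} (h : wEq c m1 m2 L)
    (h1 : m1 + L ≤ 2*c.length) (h2 : m2 + L ≤ 2*c.length) : win c m1 L = win c m2 L := by
  induction L generalizing m1 m2 with
  | zero => simp [win]
  | succ L ihL =>
    rw [win_cons c m1 L (by omega), win_cons c m2 L (by omega)]
    congr 1
    · simpa using h 0 (by omega)
    · refine ihL ?_ (by omega) (by omega)
      intro x hx
      calc bch c (m1+1+x) = bch c (m1+(x+1)) := bch_congr (by omega)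
        _ = bch c (m2+(x+1)) := h (x+1) (by omega)
        _ = bch c (m2+1+x) := bch_congr (by omega)

theorem wLt_win_aux (c : List Char) :
    ∀ p m1 m2 L, p < L → (∀ x, x < p → bch c (m1+x) = bch c (m2+x)) →
    bch c (m1+p) < bch c (m2+p) →
    m1 + L ≤ 2*c.length → m2 + L ≤ 2*c.length → win c m1 L < win c m2 L := by
  intro p
  induction p with
  | zero =>
    intro m1 m2 L hp he hlt h1 h2
    match L, hp with
    | L+1, _ =>
      rw [win_cons c m1 L (by omega), win_cons c m2 L (by omega)]
      rw [List.cons_lt_cons_iff]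
      exact Or.inl (by simpa using hlt)
  | succ p ihp =>
    intro m1 m2 L hp he hlt h1 h2
    match L, hp with
    | L+1, hp =>
      rw [win_cons c m1 L (by omega), win_cons c m2 L (by omega)]
      rw [List.cons_lt_cons_iff]
      refine Or.inr ⟨by simpa using he 0 (by omega), ?_⟩
      refine ihp (m1+1) (m2+1) L (by omega) (fun x hx => ?_) ?_ (by omega) (by omega)
      · calc bch c (m1+1+x) = bch c (m1+(x+1)) := bch_congr (by omega)
          _ = bch c (m2+(x+1)) := he (x+1) (by omega)
          _ = bch c (m2+1+x) := bch_congr (by omega)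
      · calc bch c (m1+1+p) = bch c (m1+(p+1)) := bch_congr (by omega)
          _ < bch c (m2+(p+1)) := hlt
          _ = bch c (m2+1+p) := bch_congr (by omega)

theorem wLt_win {c : List Char} {m1 m2 L : Nat} (h : wLt c m1 m2 L)
    (h1 : m1 + L ≤ 2*c.length) (h2 : m2 + L ≤ 2*c.length) : win c m1 L < win c m2 L := by
  obtain ⟨p, hp, he, hlt⟩ := h
  exact wLt_win_aux c p m1 m2 L hp he hlt h1 h2

theorem rot_win (c : List Char) (K : Nat) (hK : K ≤ c.length) :
    c.drop K ++ c.take K = win c K c.length := by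
  unfold win
  rw [List.drop_append_of_le_length hK, List.take_append]
  congr 1
  · exact (List.take_of_length_le (by simp)).symm
  · congr 1
    simp
    omega

theorem ofList_le {u v : List Char} (h : u = v ∨ u < v) :
    String.ofList u ≤ String.ofList v := by
  rcases h with h | h
  · exact le_of_eq (by rw [h])
  · refine le_of_lt ?_
    rw [String.lt_iff_toList_lt, String.toList_ofList, String.toList_ofList]
    exact h

theorem alt_eq (S : String) (K : Nat) (hn : 1 ≤ S.toList.length) (hK : K < S.toList.length)
    (hmin : ∀ m, m < S.toList.length → wLe S.toList K m S.toList.length) :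
    min_lex_cyclic_shift_alt S = String.ofList (win S.toList K S.toList.length) := by
  unfold min_lex_cyclic_shift_alt
  simp only [PySem.List.pyRange_zero_natCast, List.map_map]
  have hrots : (List.range S.toList.length).map
      ((fun i => String.ofList (PySem.List.slice S.toList (some i) none ++
        PySem.List.slice S.toList none (some i))) ∘ (fun k : Nat => (k:Int))) =
      (List.range S.toList.length).map (fun i : Nat => String.ofList (win S.toList i S.toList.length)) := by
    apply List.map_congr_left
    intro i hi
    rw [List.mem_range] at hi
    simp only [Function.comp]
    rw [PySem.List.slice_from_natCast, PySem.List.slice_to_natCast]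
    rw [rot_win S.toList i (by omega)]
  rw [hrots]
  set c := S.toList with hc
  set n := c.length with hn2
  set rots := (List.range n).map (fun i : Nat => String.ofList (win c i n)) with hrotsdef
  have hTmem : String.ofList (win c K n) ∈ rots := by
    rw [hrotsdef]
    exact List.mem_map.mpr ⟨K, List.mem_range.mpr hK, rfl⟩
  have hTle : ∀ y ∈ rots, String.ofList (win c K n) ≤ y := by
    intro y hy
    rw [hrotsdef] at hy
    obtain ⟨i, hi, rfl⟩ := List.mem_map.mp hy
    rw [List.mem_range] at hi
    apply ofList_le
    rcases hmin i hi with hlt | heq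
    · exact Or.inr (wLt_win hlt (by omega) (by omega))
    · exact Or.inl (wEq_win heq (by omega) (by omega))
  have hne : rots ≠ [] := by
    rw [hrotsdef]
    simp only [ne_eq, List.map_eq_nil_iff, List.range_eq_nil]
    omega
  simp only [PySem.List.minD]
  cases hmin? : PySem.List.min? rots (fun x => x) with
  | none => exact absurd ((PySem.List.min?_eq_none_iff rots (fun x => x)).mp hmin?) hne
  | some m0 =>
    have h1 : m0 ≤ String.ofList (win c K n) := PySem.List.min?_isMin hmin? _ hTmem
    have h2 : String.ofList (win c K n) ≤ m0 := hTle m0 (PySem.List.min?_mem hmin?)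
    simpa using le_antisymm h1 h2

theorem portA_eq (S : String) (hn : 1 ≤ S.toList.length) :
    min_lex_cyclic_shift S = String.ofList
      (win S.toList ((mrun S.toList (2 * S.toList.length - 1)).2) S.toList.length) := by
  unfold min_lex_cyclic_shift
  simp only []
  set c := S.toList with hc
  set n := c.length with hndef
  have hlent : (c ++ c).length = 2 * n := by simp [hndef]; omega
  have hnint : PySem.Int.floordiv (((c ++ c).length : Nat) : Int) 2 = (n : Int) := by
    rw [hlent]
    simp [PySem.Int.floordiv]
  simp only [hnint]
  have h2n : (2 * (n : Int)) = ((2 * n : Nat) : Int) := by push_cast; ring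
  simp only [h2n]
  have htoNat : ((2 * n : Nat) : Int).toNat = 2 * n := by omega
  simp only [htoNat]
  rw [pyRange_one_natCast, List.foldl_map]
  have hfold : (List.range' 1 (2 * n - 1)).foldl
      (fun (st : List Int × Int) (j : Nat) => boothStep (c ++ c) st (j:Int))
      (List.replicate (2 * n) (-1), 0) = portRun c (2 * n - 1) := rfl
  rw [hfold]
  have hsim := sim_run c (by omega) (2 * n - 1) (le_refl _)
  rw [hsim.1]
  set K := (mrun c (2 * n - 1)).2 with hK
  have hcast : (K : Int) + (n : Int) = ((K + n : Nat) : Int) := by push_cast; ring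
  rw [hcast, PySem.List.slice_natCast]
  have e : K + n - K = n := by omega
  rw [e]
  rfl

theorem ports_agree (S : String) : min_lex_cyclic_shift S = min_lex_cyclic_shift_alt S := by
  rcases Nat.eq_zero_or_pos S.toList.length with h | h
  · have hc : S.toList = [] := List.length_eq_zero_iff.mp h
    unfold min_lex_cyclic_shift min_lex_cyclic_shift_alt
    rw [hc]
    rfl
  · obtain ⟨hKn, hmin⟩ := mrun_final S.toList h
    rw [portA_eq S h, alt_eq S (mrun S.toList (2 * S.toList.length - 1)).2 h hKn hmin]


-- ===== VERDICT (by name: the statement is the Claim_ definition above) =====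
theorem min_lex_cyclic_shift_spec : Claim_equal_min_lex_cyclic_shift := by
  intro S _
  exact ports_agree S
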